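-- pv_equiv track=rewrite | github.com/richnakasato/fc | triple_sum.py | double_sum
-- ===== SOURCE A (Python) =====
-- def double_sum(arr, target, skip_idx):
--     memo = set()
--     for idx, val in enumerate(arr):
--         if idx != skip_idx:
--             sub_target = target-val
--             if sub_target not in memo:
--                 memo.add(val)
--             else:
--                 return sub_target, val
--     return None
-- ===== SOURCE B (Python) =====
-- def double_sum(arr, target, skip_idx):
--     n = len(arr)
--     for j in range(n):
--         if j != skip_idx:
--             for i in range(j):
--                 if i != skip_idx and arr[i] + arr[j] == target:
--                     return arr[i], arr[j]
--     return None
-- ===== Notes on version B (the rewrite author's own statement) =====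
-- stated objective: alternative
-- what changed: Replaced the incremental hash-set of seen values with a direct nested index scan: for each j (skipping skip_idx) scan earlier indices i<j for arr[i]+arr[j]==target, returning (arr[i], arr[j]) at the first hit.
import Mathlib
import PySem

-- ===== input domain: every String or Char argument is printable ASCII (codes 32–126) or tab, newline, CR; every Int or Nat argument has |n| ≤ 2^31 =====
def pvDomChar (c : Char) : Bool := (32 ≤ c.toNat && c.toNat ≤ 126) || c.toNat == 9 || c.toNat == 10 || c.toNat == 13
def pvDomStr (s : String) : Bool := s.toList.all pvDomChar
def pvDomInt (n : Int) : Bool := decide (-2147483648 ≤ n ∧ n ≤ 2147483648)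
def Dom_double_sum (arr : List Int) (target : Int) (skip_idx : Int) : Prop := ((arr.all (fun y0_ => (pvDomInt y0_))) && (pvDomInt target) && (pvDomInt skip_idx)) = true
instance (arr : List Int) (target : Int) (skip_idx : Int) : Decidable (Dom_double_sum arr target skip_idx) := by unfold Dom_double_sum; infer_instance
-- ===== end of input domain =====

-- B replaces A's hash-set scan by a brute-force nested index scan (alternative decomposition, not faster).

-- ===== PORT A =====
-- the 'for idx, val in enumerate(arr)' loop carrying the set 'memo'
def dsGo (target skip_idx : Int) : List (Int × Int) → PySem.Set Int → Option (Int × Int)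
  | [], _ => none
  | (idx, val) :: rest, memo =>
    if idx ≠ skip_idx then
      if ¬ (PySem.Set.contains memo (target - val) = true) then
        dsGo target skip_idx rest (PySem.Set.add memo val)
      else some (target - val, val)
    else dsGo target skip_idx rest memo

def double_sum (arr : List Int) (target : Int) (skip_idx : Int) : Option (Int × Int) :=
  dsGo target skip_idx (PySem.List.enumerate arr) PySem.Set.empty

-- ===== PORT B =====
-- inner 'for i in range(j)' loop; arr[i]/arr[j] is exact as getD since 0 ≤ i < j < len(arr)
def dsInner (arr : List Int) (target skip_idx : Int) (j : Nat) : List Nat → Option (Int × Int)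
  | [] => none
  | i :: rest =>
    if (i : Int) ≠ skip_idx ∧ arr.getD i 0 + arr.getD j 0 = target then
      some (arr.getD i 0, arr.getD j 0)
    else dsInner arr target skip_idx j rest

-- outer 'for j in range(n)' loop
def dsOuter (arr : List Int) (target skip_idx : Int) : List Nat → Option (Int × Int)
  | [] => none
  | j :: rest =>
    if (j : Int) ≠ skip_idx then
      match dsInner arr target skip_idx j (List.range j) with
      | some p => some p
      | none => dsOuter arr target skip_idx rest
    else dsOuter arr target skip_idx rest

def double_sum_alt (arr : List Int) (target : Int) (skip_idx : Int) : Option (Int × Int) :=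
  dsOuter arr target skip_idx (List.range arr.length)

-- ===== PRECONDITION & SPEC =====
def Spec_double_sum (arr : List Int) (target : Int) (skip_idx : Int) (out : Option (Int × Int)) : Prop := out = double_sum_alt arr target skip_idx
instance (arr : List Int) (target : Int) (skip_idx : Int) (out : Option (Int × Int)) : Decidable (Spec_double_sum arr target skip_idx out) := by unfold Spec_double_sum; infer_instance

-- ===== CLAIM (what is proved, stated in full; the proofs are below) =====
def Claim_equal_double_sum : Prop := ∀ (arr : List Int) (target : Int) (skip_idx : Int), Dom_double_sum arr target skip_idx → Spec_double_sum arr target skip_idx (double_sum arr target skip_idx)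

-- ===== LEMMAS AND PROOFS =====

-- enumerate as a map over absolute indices
theorem enum_map (xs : List Int) : ∀ (s : Nat),
    PySem.List.enumerate xs (s : Int)
      = (List.range' s xs.length).map (fun (i : Nat) => ((i : Int), xs.getD (i - s) 0)) := by
  induction xs with
  | nil => intro s; simp [PySem.List.enumerate_nil]
  | cons x xs ih =>
    intro s
    have : ((s : Int) + 1) = ((s + 1 : Nat) : Int) := by push_cast; ring
    rw [PySem.List.enumerate_cons, this, ih (s + 1)]
    simp only [List.length_cons, List.range'_succ, List.map_cons]
    congr 1
    · simp
    · apply List.map_congr_left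
      intro i hi
      have hle : s + 1 ≤ i := (List.mem_range'_1.mp hi).1
      have h1 : i - s = (i - (s + 1)) + 1 := by omega
      simp [h1]

-- the inner scan finds the complement iff some earlier non-skipped index carries it
theorem inner_eq (arr : List Int) (target skip_idx : Int) (j : Nat) : ∀ (l : List Nat),
    dsInner arr target skip_idx j l
      = if (∃ i ∈ l, (i : Int) ≠ skip_idx ∧ arr.getD i 0 = target - arr.getD j 0) then
          some (target - arr.getD j 0, arr.getD j 0)
        else none := by
  intro l
  induction l with
  | nil => simp [dsInner]
  | cons i rest ih =>
    rw [dsInner]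
    by_cases hc : (i : Int) ≠ skip_idx ∧ arr.getD i 0 + arr.getD j 0 = target
    · rw [if_pos hc, if_pos ⟨i, List.mem_cons_self, hc.1, by omega⟩]
      have : arr.getD i 0 = target - arr.getD j 0 := by omega
      rw [this]
    · rw [if_neg hc, ih]
      by_cases he : ∃ i ∈ rest, (i : Int) ≠ skip_idx ∧ arr.getD i 0 = target - arr.getD j 0
      · rw [if_pos he, if_pos (by obtain ⟨i', h1, h2, h3⟩ := he; exact ⟨i', List.mem_cons_of_mem _ h1, h2, h3⟩)]
      · rw [if_neg he, if_neg]
        rintro ⟨i', hmem, h2, h3⟩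
        rcases List.mem_cons.mp hmem with h | h
        · subst h; exact hc ⟨h2, by omega⟩
        · exact he ⟨i', h, h2, h3⟩

-- the key invariant-driven equality of the two loops
theorem loop_eq (arr : List Int) (target skip_idx : Int) : ∀ (k j : Nat) (memo : PySem.Set Int),
    (∀ x, x ∈ memo ↔ ∃ i, i < j ∧ (i : Int) ≠ skip_idx ∧ arr.getD i 0 = x) →
    dsGo target skip_idx ((List.range' j k).map (fun (i : Nat) => ((i : Int), arr.getD i 0))) memo
      = dsOuter arr target skip_idx (List.range' j k) := by
  intro k
  induction k with
  | zero => intro j memo _; simp [dsGo, dsOuter]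
  | succ k ih =>
    intro j memo hmemo
    rw [List.range'_succ, List.map_cons, dsGo, dsOuter]
    by_cases hskip : (j : Int) ≠ skip_idx
    · rw [if_pos hskip, if_pos hskip]
      have hcont : PySem.Set.contains memo (target - arr.getD j 0) = true
          ↔ ∃ i ∈ List.range j, (i : Int) ≠ skip_idx ∧ arr.getD i 0 = target - arr.getD j 0 := by
        rw [PySem.Set.contains_iff, hmemo]
        constructor
        · rintro ⟨i, h1, h2, h3⟩; exact ⟨i, List.mem_range.mpr h1, h2, h3⟩
        · rintro ⟨i, h1, h2, h3⟩; exact ⟨i, List.mem_range.mp h1, h2, h3⟩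
      rw [inner_eq]
      by_cases hex : ∃ i ∈ List.range j, (i : Int) ≠ skip_idx ∧ arr.getD i 0 = target - arr.getD j 0
      · rw [if_pos hex, if_neg (not_not_intro (hcont.mpr hex))]
      · rw [if_neg hex, if_pos (by intro h; exact hex (hcont.mp h))]
        apply ih
        intro x
        rw [PySem.Set.mem_add, hmemo]
        constructor
        · rintro (⟨i, h1, h2, h3⟩ | h)
          · exact ⟨i, by omega, h2, h3⟩
          · exact ⟨j, by omega, hskip, h.symm⟩
        · rintro ⟨i, h1, h2, h3⟩
          by_cases hij : i = j
          · subst hij; exact Or.inr h3.symm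
          · exact Or.inl ⟨i, by omega, h2, h3⟩
    · rw [if_neg hskip, if_neg hskip]
      apply ih
      intro x
      rw [hmemo]
      constructor
      · rintro ⟨i, h1, h2, h3⟩; exact ⟨i, by omega, h2, h3⟩
      · rintro ⟨i, h1, h2, h3⟩
        refine ⟨i, ?_, h2, h3⟩
        have hij : i ≠ j := by
          intro hij; apply h2; rw [hij]; exact not_not.mp hskip
        omega

theorem both_eq (arr : List Int) (target skip_idx : Int) :
    double_sum arr target skip_idx = double_sum_alt arr target skip_idx := by
  unfold double_sum double_sum_alt
  have h0 : PySem.List.enumerate arr = PySem.List.enumerate arr ((0 : Nat) : Int) := by norm_num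
  rw [h0, enum_map, List.range_eq_range']
  have hmap : (List.range' 0 arr.length).map (fun (i : Nat) => ((i : Int), arr.getD (i - 0) 0))
      = (List.range' 0 arr.length).map (fun (i : Nat) => ((i : Int), arr.getD i 0)) := by
    apply List.map_congr_left; intro i _; simp
  rw [hmap]
  apply loop_eq
  intro x
  simp [PySem.Set.empty]

-- ===== VERDICT (by name: the statement is the Claim_ definition above) =====
theorem double_sum_spec : Claim_equal_double_sum := by
  intro arr target skip_idx _
  unfold Spec_double_sum
  exact both_eq arr target skip_idx
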